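-- pv_equiv track=rewrite | github.com/Lotar-lucas/Restaurant-Orders | src/helpers_functions.py | dishes_never_asked
-- ===== SOURCE A (Python) =====
-- def dishes_never_asked(data, name_client):
--     all_the_products = set()
--     list_orders_never_asked = set()
--
--     for element in data:
--         all_the_products.add(element["product"])
--         if element["name"] == name_client:
--             list_orders_never_asked.add(element["product"])
--
--     return all_the_products - list_orders_never_asked
-- ===== SOURCE B (Python) =====
-- def dishes_never_asked(data, name_client):
--     index = {}
--     for element in data:
--         index.setdefault(element["product"], set()).add(element["name"])
--     return {product for product, clients in index.items() if name_client not in clients}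
-- ===== Notes on version B (the rewrite author's own statement) =====
-- stated objective: alternative
-- what changed: B builds a single product-to-clients dict index in one pass and then returns the products whose client set lacks the client, instead of A's two parallel product sets combined by a set difference.
import Mathlib
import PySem

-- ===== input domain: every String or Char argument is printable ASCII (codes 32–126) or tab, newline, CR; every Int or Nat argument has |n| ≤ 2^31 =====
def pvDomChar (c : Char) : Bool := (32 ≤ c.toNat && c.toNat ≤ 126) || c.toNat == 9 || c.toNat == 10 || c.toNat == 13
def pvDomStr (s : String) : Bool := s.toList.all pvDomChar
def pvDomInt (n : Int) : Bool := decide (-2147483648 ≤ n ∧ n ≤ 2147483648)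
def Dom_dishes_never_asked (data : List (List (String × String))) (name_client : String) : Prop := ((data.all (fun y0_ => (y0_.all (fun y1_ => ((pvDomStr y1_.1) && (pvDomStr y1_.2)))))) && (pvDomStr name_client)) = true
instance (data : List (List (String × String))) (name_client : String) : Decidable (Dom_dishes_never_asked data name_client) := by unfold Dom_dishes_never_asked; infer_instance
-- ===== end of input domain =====

-- B replaces A's two parallel product sets + set difference by a single product→clients dict index,
-- filtered in a second pass (objective: alternative decomposition, same asymptotic cost).


-- ===== PORT A =====
def dishes_never_asked (data : List (List (String × String))) (name_client : String) : List String :=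
  let st := data.foldl
    (fun (st : PySem.Set String × PySem.Set String) element =>
      let all_the_products := PySem.Set.add st.1 ((PySem.Dict.mk element).getD "product" "")
      let list_orders_never_asked :=
        if ((PySem.Dict.mk element).getD "name" "" == name_client)
        then PySem.Set.add st.2 ((PySem.Dict.mk element).getD "product" "")
        else st.2
      (all_the_products, list_orders_never_asked))
    (PySem.Set.empty, PySem.Set.empty)
  PySem.Set.diff st.1 st.2

-- ===== PORT B =====
def dishes_never_asked_alt (data : List (List (String × String))) (name_client : String) : List String :=
  let index := data.foldl
    (fun (index : PySem.Dict String (PySem.Set String)) element =>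
      PySem.Dict.insert index ((PySem.Dict.mk element).getD "product" "")
        (PySem.Set.add (PySem.Dict.getD index ((PySem.Dict.mk element).getD "product" "") PySem.Set.empty)
          ((PySem.Dict.mk element).getD "name" "")))
    PySem.Dict.empty
  PySem.Set.ofList
    ((index.items.filter (fun kv => !(PySem.Set.contains kv.2 name_client))).map (fun kv => kv.1))

-- ===== PRECONDITION & SPEC =====
-- Pre_ excludes exactly the inputs where some order dict lacks a "product" or "name" key: Python A raises KeyError there.
def Pre_dishes_never_asked (data : List (List (String × String))) (name_client : String) : Prop :=
  ∀ e ∈ data, (PySem.Dict.mk e).contains "product" = true ∧ (PySem.Dict.mk e).contains "name" = true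
instance (data : List (List (String × String))) (name_client : String) : Decidable (Pre_dishes_never_asked data name_client) := by unfold Pre_dishes_never_asked; infer_instance

def pvWitness_dishes_never_asked : (List (List (String × String))) × String :=
  ([[("product", "pasta"), ("name", "ana")], [("product", "pizza"), ("name", "bob")]], "ana")

def Spec_dishes_never_asked (data : List (List (String × String))) (name_client : String) (out : List String) : Prop := out = dishes_never_asked_alt data name_client
instance (data : List (List (String × String))) (name_client : String) (out : List String) : Decidable (Spec_dishes_never_asked data name_client out) := by unfold Spec_dishes_never_asked; infer_instance

-- ===== CLAIM (what is proved, stated in full; the proofs are below) =====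
def Claim_equal_dishes_never_asked : Prop := ∀ (data : List (List (String × String))) (name_client : String), Dom_dishes_never_asked data name_client → Pre_dishes_never_asked data name_client → Spec_dishes_never_asked data name_client (dishes_never_asked data name_client)

-- ===== LEMMAS AND PROOFS =====

-- the two loop bodies, named for the proofs (definitionally the lambdas of the ports)
def stepA (name_client : String) (st : PySem.Set String × PySem.Set String)
    (element : List (String × String)) : PySem.Set String × PySem.Set String :=
  let all_the_products := PySem.Set.add st.1 ((PySem.Dict.mk element).getD "product" "")
  let list_orders_never_asked :=
    if ((PySem.Dict.mk element).getD "name" "" == name_client)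
    then PySem.Set.add st.2 ((PySem.Dict.mk element).getD "product" "")
    else st.2
  (all_the_products, list_orders_never_asked)

def stepB (index : PySem.Dict String (PySem.Set String))
    (element : List (String × String)) : PySem.Dict String (PySem.Set String) :=
  PySem.Dict.insert index ((PySem.Dict.mk element).getD "product" "")
    (PySem.Set.add (PySem.Dict.getD index ((PySem.Dict.mk element).getD "product" "") PySem.Set.empty)
      ((PySem.Dict.mk element).getD "name" ""))

-- the joint loop invariant: same keys in the same order, and for each product p the
-- dict's client set contains name_client exactly when A's asked-set contains p
def pvInvariant (nc : String) (ap ak : PySem.Set String)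
    (d : PySem.Dict String (PySem.Set String)) : Prop :=
  ap.Nodup ∧ (∀ x, x ∈ ak → x ∈ ap) ∧
  d.items.map (fun kv => (kv.1, PySem.Set.contains kv.2 nc)) =
    ap.map (fun p => (p, PySem.Set.contains ak p))

lemma pvContainsAdd (s : PySem.Set String) (x y : String) :
    PySem.Set.contains (PySem.Set.add s x) y = (PySem.Set.contains s y || (y == x)) := by
  by_cases h : y = x
  · subst h
    simp [PySem.Set.mem_add]
  · have hne : (y == x) = false := by simp [h]
    simp [PySem.Set.mem_add, h, hne]

lemma pvStepCore (nc p n : String) (ap ak : PySem.Set String)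
    (d : PySem.Dict String (PySem.Set String)) (h : pvInvariant nc ap ak d) :
    pvInvariant nc (PySem.Set.add ap p)
      (if (n == nc) = true then PySem.Set.add ak p else ak)
      (PySem.Dict.insert d p
        (PySem.Set.add (PySem.Dict.getD d p PySem.Set.empty) n)) := by
  obtain ⟨h1, h2, h3⟩ := h
  have hk : d.items.map (fun kv => kv.1) = ap := by
    have := congrArg (List.map (fun q : String × Bool => q.1)) h3
    simpa [List.map_map, Function.comp_def] using this
  have hkeys : d.keys.Nodup := by
    have : d.keys = ap := hk
    rw [this]; exact h1
  have hcp : d.contains p = decide (p ∈ ap) := by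
    rw [PySem.Dict.contains_eq_decide_mem_keys]
    congr 1
    show (p ∈ d.keys) = (p ∈ ap)
    rw [show d.keys = ap from hk]
  -- the asked-set of A after the step, written once
  have hak' : ∀ q : String,
      PySem.Set.contains (if (n == nc) = true then PySem.Set.add ak p else ak) q =
      (PySem.Set.contains ak q || ((q == p) && (nc == n))) := by
    intro q
    by_cases hnnc : (n == nc) = true
    · have hnc : (nc == n) = true := by
        have : n = nc := by simpa using hnnc
        simp [this]
      rw [if_pos hnnc, pvContainsAdd, hnc, Bool.and_true]
    · have hnc : (nc == n) = false := by
        have hne : n ≠ nc := by simpa using hnnc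
        simp only [beq_eq_false_iff_ne, ne_eq]
        intro e
        exact hne e.symm
      rw [if_neg hnnc, hnc, Bool.and_false, Bool.or_false]
  by_cases hp : p ∈ ap
  · -- product already seen: dict entry is overwritten in place, A's sets keep their shape
    have hc : d.contains p = true := by simp [hcp, hp]
    obtain ⟨kv, hkv_mem, hkv1⟩ : ∃ kv ∈ d.items, kv.1 = p := by
      rw [← hk] at hp
      obtain ⟨kv, hm, he⟩ := List.mem_map.mp hp
      exact ⟨kv, hm, he⟩
    have hkv_mem' : (p, kv.2) ∈ d.items := by rw [← hkv1]; exact hkv_mem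
    have hget : PySem.Dict.getD d p PySem.Set.empty = kv.2 :=
      PySem.Dict.getD_of_mem_items d hkv_mem' hkeys PySem.Set.empty
    have haddp : PySem.Set.add ap p = ap := by
      have hcap : PySem.Set.contains ap p = true := by
        simp [hp]
      simp only [PySem.Set.add, hcap, if_pos]
    refine ⟨?_, ?_, ?_⟩
    · rw [haddp]; exact h1
    · intro x hx
      rw [haddp]
      split at hx
      · rcases (PySem.Set.mem_add ak p x).mp hx with h' | h'
        · exact h2 x h'
        · rw [h']; exact hp
      · exact h2 x hx
    · -- the mapped-items equality, via a common per-pair update function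
      have hitems : (PySem.Dict.insert d p
          (PySem.Set.add (PySem.Dict.getD d p PySem.Set.empty) n)).items =
          d.items.map (fun q => if (q.1 == p) = true then (p, PySem.Set.add kv.2 n) else q) := by
        rw [hget]
        exact PySem.Dict.items_insert_of_contains d _ hc
      rw [haddp, hitems, List.map_map]
      have lhs_eq : ∀ x ∈ d.items,
          ((fun kv : String × PySem.Set String => (kv.1, PySem.Set.contains kv.2 nc)) ∘
            (fun q => if (q.1 == p) = true then (p, PySem.Set.add kv.2 n) else q)) x =
          ((fun qb : String × Bool => if (qb.1 == p) = true then (p, qb.2 || (nc == n)) else qb) ∘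
            (fun kv : String × PySem.Set String => (kv.1, PySem.Set.contains kv.2 nc))) x := by
        intro x hx
        by_cases hxe : (x.1 == p) = true
        · have hx1 : x.1 = p := by simpa using hxe
          have hx2 : x.2 = kv.2 := by
            have g1 : d.get? x.1 = some x.2 :=
              PySem.Dict.get?_of_mem_items d (by simpa using hx) hkeys
            have g2 : d.get? p = some kv.2 :=
              PySem.Dict.get?_of_mem_items d hkv_mem' hkeys
            rw [hx1, g2] at g1
            exact (Option.some.injEq _ _ ▸ g1).symm
          simp only [Function.comp_apply, hxe, if_pos]
          rw [pvContainsAdd, hx2]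
        · simp only [Function.comp_apply, hxe, Bool.false_eq_true, if_false]
      rw [List.map_congr_left lhs_eq, ← List.map_map, h3, List.map_map]
      apply List.map_congr_left
      intro q hq
      simp only [Function.comp_apply]
      rw [hak' q]
      by_cases hqp : (q == p) = true
      · have hq1 : q = p := by simpa using hqp
        subst hq1
        simp only [hqp, if_pos, Bool.true_and]
      · simp only [hqp, Bool.false_eq_true, if_false, Bool.false_and, Bool.or_false]
  · -- a new product: the dict appends a fresh entry, A's product set appends p
    have hc : d.contains p = false := by simp [hcp, hp]
    have hap : PySem.Set.contains ap p = false := by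
      simp [hp]
    have haddp : PySem.Set.add ap p = ap ++ [p] := by
      simp only [PySem.Set.add, hap, Bool.false_eq_true, if_false]
    have hitems : (PySem.Dict.insert d p
        (PySem.Set.add (PySem.Dict.getD d p PySem.Set.empty) n)).items =
        d.items ++ [(p, PySem.Set.add PySem.Set.empty n)] := by
      rw [PySem.Dict.getD_of_not_contains d _ hc]
      exact PySem.Dict.items_insert_of_not_contains d _ hc
    refine ⟨?_, ?_, ?_⟩
    · rw [haddp]
      refine List.Nodup.append h1 (List.nodup_singleton p) ?_
      intro a ha hb
      rw [List.mem_singleton] at hb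
      exact hp (hb ▸ ha)
    · intro x hx
      rw [haddp]
      simp only [List.mem_append, List.mem_singleton]
      split at hx
      · rcases (PySem.Set.mem_add ak p x).mp hx with h' | h'
        · exact Or.inl (h2 x h')
        · exact Or.inr h'
      · exact Or.inl (h2 x hx)
    · rw [haddp, hitems, List.map_append, List.map_append]
      congr 1
      · rw [h3]
        apply List.map_congr_left
        intro q hq
        have hqp : (q == p) = false := by
          simp only [beq_eq_false_iff_ne, ne_eq]
          intro he; exact hp (he ▸ hq)
        rw [hak' q, hqp, Bool.false_and, Bool.or_false]
      · simp only [List.map_cons, List.map_nil]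
        have h5 : PySem.Set.contains (PySem.Set.add PySem.Set.empty n) nc = (nc == n) := by
          rw [pvContainsAdd]
          rfl
        have h6 : PySem.Set.contains ak p = false := by
          have hpak : p ∉ ak := fun h' => hp (h2 p h')
          simp [hpak]
        rw [h5, hak' p, h6, Bool.false_or, BEq.rfl, Bool.true_and]

lemma pvStep (nc : String) (e : List (String × String)) (ap ak : PySem.Set String)
    (d : PySem.Dict String (PySem.Set String)) (h : pvInvariant nc ap ak d) :
    pvInvariant nc (stepA nc (ap, ak) e).1 (stepA nc (ap, ak) e).2 (stepB d e) :=
  pvStepCore nc ((PySem.Dict.mk e).getD "product" "") ((PySem.Dict.mk e).getD "name" "")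
    ap ak d h

lemma pvInv (nc : String) (data : List (List (String × String))) :
    ∀ (ap ak : PySem.Set String) (d : PySem.Dict String (PySem.Set String)),
    pvInvariant nc ap ak d →
    pvInvariant nc (data.foldl (stepA nc) (ap, ak)).1 (data.foldl (stepA nc) (ap, ak)).2
      (data.foldl stepB d) := by
  induction data with
  | nil => intro ap ak d h; simpa using h
  | cons e rest ih =>
      intro ap ak d h
      have h' := pvStep nc e ap ak d h
      simpa using ih (stepA nc (ap, ak) e).1 (stepA nc (ap, ak) e).2 (stepB d e) h'

lemma pvFinal (nc : String) (ap ak : PySem.Set String)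
    (d : PySem.Dict String (PySem.Set String)) (h : pvInvariant nc ap ak d) :
    PySem.Set.ofList
      ((d.items.filter (fun kv => !(PySem.Set.contains kv.2 nc))).map (fun kv => kv.1)) =
    PySem.Set.diff ap ak := by
  obtain ⟨h1, _, h3⟩ := h
  have e1 : (d.items.filter (fun kv => !(PySem.Set.contains kv.2 nc))).map (fun kv => kv.1) =
      ((d.items.map (fun kv => (kv.1, PySem.Set.contains kv.2 nc))).filter
        (fun q => !q.2)).map (fun q => q.1) := by
    rw [List.filter_map, List.map_map]
    rfl
  have e2 : ((ap.map (fun p => (p, PySem.Set.contains ak p))).filter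
      (fun q => !q.2)).map (fun q => q.1) =
      ap.filter (fun p => !(PySem.Set.contains ak p)) := by
    rw [List.filter_map, List.map_map]
    exact List.map_id _
  rw [e1, h3, e2]
  have hdiff : ap.filter (fun p => !(PySem.Set.contains ak p)) = PySem.Set.diff ap ak := rfl
  rw [hdiff]
  exact PySem.Set.ofList_eq_self_of_nodup _ (PySem.Set.nodup_diff ap ak h1)

-- ===== VERDICT (by name: the statement is the Claim_ definition above) =====
theorem dishes_never_asked_spec : Claim_equal_dishes_never_asked := by
  intro data nc _ _
  unfold Spec_dishes_never_asked
  have hA : dishes_never_asked data nc =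
      PySem.Set.diff (data.foldl (stepA nc) (PySem.Set.empty, PySem.Set.empty)).1
        (data.foldl (stepA nc) (PySem.Set.empty, PySem.Set.empty)).2 := rfl
  have hB : dishes_never_asked_alt data nc =
      PySem.Set.ofList
        (((data.foldl stepB PySem.Dict.empty).items.filter
          (fun kv => !(PySem.Set.contains kv.2 nc))).map (fun kv => kv.1)) := rfl
  have h0 : pvInvariant nc PySem.Set.empty PySem.Set.empty PySem.Dict.empty := by
    refine ⟨List.nodup_nil, ?_, rfl⟩
    intro x hx
    exact absurd hx (List.not_mem_nil)
  have h := pvInv nc data PySem.Set.empty PySem.Set.empty PySem.Dict.empty h0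
  rw [hA, hB, pvFinal nc _ _ _ h]
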